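-- pv_equiv track=rewrite | github.com/8adimka/Python | LeetCode_Stolyarov_training/LeetCode/hotel_rooms.py | room_counter
-- ===== SOURCE A (Python) =====
-- def room_counter(events_list: list) -> int:
--     days_set = set()
--     counter = 0
--     if events_list:
--         counter += 1
--
--     events_list.sort(key=lambda x: sum(x))
--
--     for event in events_list:
--         current_event = set(range(event[0], event[-1]))
--         for day in current_event:
--             if day in days_set:
--                 counter += 1
--                 break
--         days_set.update(current_event)
--
--     return counter
-- ===== SOURCE B (Python) =====
-- def room_counter(events_list: list) -> int:
--     # Same in-place sort side effect as A; counts events whose [start, end) range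
--     # overlaps the union of previously seen ranges, kept as intervals (no per-day set).
--     events_list.sort(key=sum)
--     counter = 1 if events_list else 0
--     intervals = []
--     for event in events_list:
--         a, b = event[0], event[-1]
--         if a < b:
--             if any(l < b and a < r for l, r in intervals):
--                 counter += 1
--             intervals.append((a, b))
--     return counter
-- ===== Notes on version B (the rewrite author's own statement) =====
-- stated objective: faster
-- what changed: B replaces A's per-day hash set (materialising every day of every interval) with a list of seen [start,end) intervals and an arithmetic overlap test, so no per-day work at all.
import Mathlib
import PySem

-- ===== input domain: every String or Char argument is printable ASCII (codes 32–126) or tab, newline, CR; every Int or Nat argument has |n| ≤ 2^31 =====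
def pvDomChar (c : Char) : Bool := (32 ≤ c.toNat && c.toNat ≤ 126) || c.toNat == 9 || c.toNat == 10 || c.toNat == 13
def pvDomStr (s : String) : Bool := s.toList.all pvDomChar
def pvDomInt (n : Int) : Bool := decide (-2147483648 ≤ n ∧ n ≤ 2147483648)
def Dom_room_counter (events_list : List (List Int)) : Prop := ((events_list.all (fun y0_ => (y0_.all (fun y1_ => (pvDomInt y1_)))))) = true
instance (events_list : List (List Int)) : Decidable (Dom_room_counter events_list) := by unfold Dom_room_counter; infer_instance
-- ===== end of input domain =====

-- B replaces A's per-day hash set with a list of seen [start,end) intervals and an arithmetic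
-- overlap test (no per-day iteration). Note: both Pythons sort events_list in place; the
-- equivalence proved here is about the RETURN value (the mutation is identical anyway).

-- ===== PORT A =====
-- for day in current_event: if day in days_set: counter += 1; break
-- (iterates a Python set, but the resulting Bool is independent of iteration order)
def pvAHit (days : PySem.Set Int) (current : PySem.Set Int) : Bool :=
  current.any (fun d => PySem.Set.contains days d)

def pvALoop (evs : List (List Int)) (days : PySem.Set Int) (counter : Int) : Int :=
  match evs with
  | [] => counter
  | e :: rest =>
    -- e[0] / e[-1]; pyGetD's default is only reached on e = [], excluded by Pre_
    let a := PySem.List.pyGetD e 0 0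
    let b := PySem.List.pyGetD e (-1) 0
    let current : PySem.Set Int := PySem.Set.ofList (PySem.List.pyRange a b 1)
    let counter' := if pvAHit days current then counter + 1 else counter
    pvALoop rest (PySem.Set.update days current) counter'

def room_counter (events_list : List (List Int)) : Int :=
  let counter : Int := if events_list.isEmpty then 0 else 1
  pvALoop (PySem.List.sorted events_list (fun x => x.sum) false) PySem.Set.empty counter

-- ===== PORT B =====
def pvBLoop (evs : List (List Int)) (ivs : List (Int × Int)) (counter : Int) : Int :=
  match evs with
  | [] => counter
  | e :: rest =>
    let a := PySem.List.pyGetD e 0 0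
    let b := PySem.List.pyGetD e (-1) 0
    if a < b then
      let counter' := if ivs.any (fun p => decide (p.1 < b) && decide (a < p.2)) then counter + 1 else counter
      pvBLoop rest (ivs ++ [(a, b)]) counter'
    else
      pvBLoop rest ivs counter

def room_counter_alt (events_list : List (List Int)) : Int :=
  let counter : Int := if events_list.isEmpty then 0 else 1
  pvBLoop (PySem.List.sorted events_list (fun x => x.sum) false) [] counter

-- ===== PRECONDITION & SPEC =====
-- Pre_ excludes inputs containing an empty inner list, on which Python A (and B) raises IndexError.
def Pre_room_counter (events_list : List (List Int)) : Prop :=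
  ∀ e ∈ events_list, e ≠ []
instance (events_list : List (List Int)) : Decidable (Pre_room_counter events_list) := by
  unfold Pre_room_counter; infer_instance

def pvWitness_room_counter : List (List Int) := [[1, 3], [2, 5], [7, 8]]

def Spec_room_counter (events_list : List (List Int)) (out : Int) : Prop := out = room_counter_alt events_list
instance (events_list : List (List Int)) (out : Int) : Decidable (Spec_room_counter events_list out) := by unfold Spec_room_counter; infer_instance

-- ===== CLAIM (what is proved, stated in full; the proofs are below) =====
def Claim_equal_room_counter : Prop := ∀ (events_list : List (List Int)), Dom_room_counter events_list → Pre_room_counter events_list → Spec_room_counter events_list (room_counter events_list)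

-- ===== LEMMAS AND PROOFS =====

-- Invariant: days is exactly the union of the stored intervals, and every stored interval is nonempty.
lemma pvLoop_eq (evs : List (List Int)) :
    ∀ (days : PySem.Set Int) (ivs : List (Int × Int)) (counter : Int),
    (∀ d : Int, PySem.Set.contains days d = true ↔ ∃ p ∈ ivs, p.1 ≤ d ∧ d < p.2) →
    (∀ p ∈ ivs, p.1 < p.2) →
    pvALoop evs days counter = pvBLoop evs ivs counter := by
  induction evs with
  | nil => intro days ivs counter _ _; rfl
  | cons e rest ih =>
    intro days ivs counter hinv hne
    simp only [pvALoop, pvBLoop]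
    set a := PySem.List.pyGetD e 0 0 with ha
    set b := PySem.List.pyGetD e (-1) 0 with hb
    have hmemS : ∀ d : Int, d ∈ PySem.Set.ofList (PySem.List.pyRange a b 1) ↔ a ≤ d ∧ d < b := by
      intro d
      rw [PySem.Set.mem_ofList, PySem.List.mem_pyRange_one]
    by_cases hab : a < b
    · simp only [if_pos hab]
      have hhit : pvAHit days (PySem.Set.ofList (PySem.List.pyRange a b 1))
          = ivs.any (fun p => decide (p.1 < b) && decide (a < p.2)) := by
        apply Bool.eq_iff_iff.mpr
        simp only [pvAHit, List.any_eq_true, Bool.and_eq_true, decide_eq_true_eq]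
        constructor
        · rintro ⟨d, hdS, hdC⟩
          rcases (hinv d).mp hdC with ⟨p, hp, h1, h2⟩
          rcases (hmemS d).mp hdS with ⟨h3, h4⟩
          exact ⟨p, hp, by omega, by omega⟩
        · rintro ⟨p, hp, h1, h2⟩
          have hlt := hne p hp
          refine ⟨max a p.1, (hmemS _).mpr ⟨le_max_left _ _, by omega⟩, (hinv _).mpr ⟨p, hp, le_max_right _ _, by omega⟩⟩
      rw [hhit]
      apply ih
      · intro d
        rw [PySem.Set.contains_iff, PySem.Set.mem_update, ← PySem.Set.contains_iff, hmemS]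
        constructor
        · rintro (h | h)
          · rcases (hinv d).mp h with ⟨p, hp, h1, h2⟩
            exact ⟨p, by simp [hp], h1, h2⟩
          · exact ⟨(a, b), by simp, h.1, h.2⟩
        · rintro ⟨p, hp, h1, h2⟩
          rcases List.mem_append.mp hp with hp | hp
          · exact Or.inl ((hinv d).mpr ⟨p, hp, h1, h2⟩)
          · simp only [List.mem_singleton] at hp
            subst hp; exact Or.inr ⟨h1, h2⟩
      · intro p hp
        rcases List.mem_append.mp hp with hp | hp
        · exact hne p hp
        · simp only [List.mem_singleton] at hp; subst hp; exact hab
    · simp only [if_neg hab]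
      have hhit : pvAHit days (PySem.Set.ofList (PySem.List.pyRange a b 1)) = false := by
        simp only [pvAHit, List.any_eq_false]
        intro d hdS
        rcases (hmemS d).mp hdS with ⟨h1, h2⟩
        omega
      rw [hhit]
      simp only [Bool.false_eq_true, if_false]
      apply ih
      · intro d
        rw [PySem.Set.contains_iff, PySem.Set.mem_update, ← PySem.Set.contains_iff]
        constructor
        · rintro (h | h)
          · exact (hinv d).mp h
          · rcases (hmemS d).mp h with ⟨h1, h2⟩; omega
        · intro h; exact Or.inl ((hinv d).mpr h)
      · exact hne

-- ===== VERDICT (by name: the statement is the Claim_ definition above) =====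
theorem room_counter_spec : Claim_equal_room_counter := by
  intro events_list _ _
  unfold Spec_room_counter room_counter room_counter_alt
  exact pvLoop_eq _ PySem.Set.empty [] _ (by simp [PySem.Set.empty, PySem.Set.contains]) (by simp)
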